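-- pv_equiv track=rewrite | github.com/byAbaddon/Python-Fundamentals-Exercises-September-2024 | 0.5 Lists_Exercises/02. Split by Word Casing.py | check_word_type
-- ===== SOURCE A (Python) =====
-- def check_word_type(word):
--     is_lower = True
--     is_upper = True
--
--     for char in word:
--         if 'a' <= char <= 'z':
--             is_upper = False
--         elif 'A' <= char <= 'Z':
--             is_lower = False
--         else:
--             is_lower = False
--             is_upper = False
--             break
--
--     if is_lower:
--         return 'lower'
--     elif is_upper:
--         return 'upper'
--     else:
--         return 'mixed'
-- ===== SOURCE B (Python) =====
-- def check_word_type(word):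
--     if all('a' <= c <= 'z' for c in word):
--         return 'lower'
--     if all('A' <= c <= 'Z' for c in word):
--         return 'upper'
--     return 'mixed'
-- ===== Notes on version B (the rewrite author's own statement) =====
-- stated objective: simpler
-- what changed: Replaced the two-flag tracking loop with break by two sequential all() membership scans (lowercase scan, then uppercase scan), with no mutable state.
import Mathlib
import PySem

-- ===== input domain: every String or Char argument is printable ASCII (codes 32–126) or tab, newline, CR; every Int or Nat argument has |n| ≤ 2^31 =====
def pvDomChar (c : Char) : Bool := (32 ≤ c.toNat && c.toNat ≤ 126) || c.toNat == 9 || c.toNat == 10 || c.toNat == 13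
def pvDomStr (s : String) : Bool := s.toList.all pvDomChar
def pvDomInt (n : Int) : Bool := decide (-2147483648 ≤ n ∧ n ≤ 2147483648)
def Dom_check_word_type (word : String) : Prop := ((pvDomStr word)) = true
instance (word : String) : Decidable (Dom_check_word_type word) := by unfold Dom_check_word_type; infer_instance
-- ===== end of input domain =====

-- B replaces A's two-flag loop with break by two sequential all-scans; objective: simpler.

-- ===== PORT A =====
-- A's for-loop with break, as structural recursion over the two flags
def checkWordTypeLoop : List Char → Bool → Bool → Bool × Bool
  | [], isLower, isUpper => (isLower, isUpper)
  | c :: cs, isLower, isUpper =>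
    if 'a' ≤ c ∧ c ≤ 'z' then checkWordTypeLoop cs isLower false
    else if 'A' ≤ c ∧ c ≤ 'Z' then checkWordTypeLoop cs false isUpper
    else (false, false)

def check_word_type (word : String) : String :=
  let r := checkWordTypeLoop word.toList true true
  if r.1 then "lower" else if r.2 then "upper" else "mixed"

-- ===== PORT B =====
def check_word_type_alt (word : String) : String :=
  if word.toList.all (fun c => decide ('a' ≤ c) && decide (c ≤ 'z')) then "lower"
  else if word.toList.all (fun c => decide ('A' ≤ c) && decide (c ≤ 'Z')) then "upper"
  else "mixed"

-- ===== PRECONDITION & SPEC =====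
def Spec_check_word_type (word : String) (out : String) : Prop := out = check_word_type_alt word
instance (word : String) (out : String) : Decidable (Spec_check_word_type word out) := by unfold Spec_check_word_type; infer_instance

-- ===== CLAIM (what is proved, stated in full; the proofs are below) =====
def Claim_equal_check_word_type : Prop := ∀ (word : String), Dom_check_word_type word → Spec_check_word_type word (check_word_type word)

-- ===== LEMMAS AND PROOFS =====
-- A's loop computes (isLower && all-lowercase, isUpper && all-uppercase): a char that is
-- neither makes both conjuncts false, which is what the break produces.
theorem checkWordTypeLoop_eq (cs : List Char) (l u : Bool) :
    checkWordTypeLoop cs l u =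
      (l && cs.all (fun c => decide ('a' ≤ c) && decide (c ≤ 'z')),
       u && cs.all (fun c => decide ('A' ≤ c) && decide (c ≤ 'Z'))) := by
  induction cs generalizing l u with
  | nil => simp [checkWordTypeLoop]
  | cons c cs ih =>
    simp only [checkWordTypeLoop, List.all_cons]
    split_ifs with h1 h2
    · have hnu : ¬ ('A' ≤ c ∧ c ≤ 'Z') := by
        rcases h1 with ⟨ha, hb⟩
        intro ⟨_, hB⟩
        exact absurd (le_trans ha hB) (by decide)
      rw [ih]
      rcases not_and_or.mp hnu with h | h <;> simp [h1.1, h1.2, h]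
    · rw [ih]
      have : ¬ ('a' ≤ c ∧ c ≤ 'z') := h1
      simp [h2.1, h2.2]
      rcases (not_and_or.mp this) with h | h <;> simp [h]
    · have hA : ¬ ('a' ≤ c ∧ c ≤ 'z') := h1
      have hB : ¬ ('A' ≤ c ∧ c ≤ 'Z') := h2
      rcases (not_and_or.mp hA) with h | h <;> rcases (not_and_or.mp hB) with h' | h' <;>
        simp [h, h']

-- ===== VERDICT (by name: the statement is the Claim_ definition above) =====
theorem check_word_type_spec : Claim_equal_check_word_type := by
  intro word _
  unfold Spec_check_word_type check_word_type check_word_type_alt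
  rw [checkWordTypeLoop_eq]
  simp
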